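-- pv_equiv track=rewrite | github.com/tmarkn/Advent2020 | Day12/Day12.py | findDestination1
-- ===== SOURCE A (Python) =====
-- def findDestination1(instructions):
--     cardinal = ['N', 'E', 'S', 'W']
--     north = east = 0
--     facing = 1
--     for dir in instructions:
--         go, num = dir
--
--         if go == 'F':
--             go = cardinal[facing]
--         if go == 'N':
--             north += num
--         elif go == 'E':
--             east += num
--         elif go == 'S':
--             north -= num
--         elif go == 'W':
--             east -= num
--         elif go == 'R':
--             facing = (facing + (num // 90)) % 4
--         elif go == 'L':
--             facing = (facing - (num // 90)) % 4
--     return north, east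
-- ===== SOURCE B (Python) =====
-- def findDestination1(instructions):
--     # stage 1: cumulative heading index in effect at each instruction
--     headings = []
--     h = 1
--     for go, num in instructions:
--         headings.append(h)
--         if go == 'R':
--             h = (h + num // 90) % 4
--         elif go == 'L':
--             h = (h - num // 90) % 4
--     # stage 2: table-driven vector sum of displacements
--     DIRS = [(1, 0), (0, 1), (-1, 0), (0, -1)]
--     VEC = {'N': (1, 0), 'E': (0, 1), 'S': (-1, 0), 'W': (0, -1)}
--     north = east = 0
--     for (go, num), h in zip(instructions, headings):
--         dn, de = DIRS[h] if go == 'F' else VEC.get(go, (0, 0))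
--         north += num * dn
--         east += num * de
--     return north, east
-- ===== Notes on version B (the rewrite author's own statement) =====
-- stated objective: alternative
-- what changed: B splits the simulation into two staged passes: pass 1 scans only the rotations to tabulate the heading index in effect at each instruction, pass 2 sums table-driven displacement vectors (DIRS[h] for 'F', a letter->vector dict otherwise), replacing A's single-pass state machine with its if-elif dispatch and 'F'->cardinal-letter re-dispatch.
import Mathlib
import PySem

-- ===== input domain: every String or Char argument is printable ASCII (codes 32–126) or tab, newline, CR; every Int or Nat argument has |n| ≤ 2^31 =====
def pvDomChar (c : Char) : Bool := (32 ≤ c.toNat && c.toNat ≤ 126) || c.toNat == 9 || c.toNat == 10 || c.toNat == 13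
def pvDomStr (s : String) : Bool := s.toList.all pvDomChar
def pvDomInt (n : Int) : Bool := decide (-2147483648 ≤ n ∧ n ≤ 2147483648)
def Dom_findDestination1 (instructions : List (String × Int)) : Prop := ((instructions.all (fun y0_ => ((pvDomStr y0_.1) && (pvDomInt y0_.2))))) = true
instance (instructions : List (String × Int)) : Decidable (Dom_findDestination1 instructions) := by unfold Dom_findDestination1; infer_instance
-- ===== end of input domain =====

-- B replaces A's single-pass state machine by two staged passes (heading table, then a vector sum); return values only, no side effects.

-- ===== PORT A =====
-- one loop iteration of A over state (north, east, facing)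
def pvStepA (st : Int × Int × Int) (dir : String × Int) : Int × Int × Int :=
  let north := st.1; let east := st.2.1; let facing := st.2.2
  let go := dir.1; let num := dir.2
  -- cardinal[facing]: facing is always in {0,1,2,3} (starts at 1, only reassigned via % 4), so pyGet? is always `some`; the default is unreachable
  let go := if go = "F" then (PySem.List.pyGet? ["N", "E", "S", "W"] facing).getD go else go
  if go = "N" then (north + num, east, facing)
  else if go = "E" then (north, east + num, facing)
  else if go = "S" then (north - num, east, facing)
  else if go = "W" then (north, east - num, facing)
  else if go = "R" then (north, east, PySem.Int.mod (facing + PySem.Int.floordiv num 90) 4)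
  else if go = "L" then (north, east, PySem.Int.mod (facing - PySem.Int.floordiv num 90) 4)
  else (north, east, facing)

def findDestination1 (instructions : List (String × Int)) : Int × Int :=
  let st := instructions.foldl pvStepA (0, 0, 1)
  (st.1, st.2.1)

-- ===== PORT B =====
-- stage 1: the heading index in effect at each instruction (cumulative rotations)
def pvNextHead (h : Int) (go : String) (num : Int) : Int :=
  if go = "R" then PySem.Int.mod (h + PySem.Int.floordiv num 90) 4
  else if go = "L" then PySem.Int.mod (h - PySem.Int.floordiv num 90) 4
  else h

def pvHeads (ins : List (String × Int)) (h : Int) : List Int :=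
  match ins with
  | [] => []
  | (go, num) :: tl => h :: pvHeads tl (pvNextHead h go num)

def pvDIRS : List (Int × Int) := [(1, 0), (0, 1), (-1, 0), (0, -1)]
def pvVEC : PySem.Dict String (Int × Int) :=
  PySem.Dict.ofList [("N", (1, 0)), ("E", (0, 1)), ("S", (-1, 0)), ("W", (0, -1))]

-- stage 2: one summand of the vector sum
-- DIRS[h]: h always lies in {0,1,2,3} (built via % 4), so pyGet? is always `some`; the default is unreachable
def pvStep2 (st : Int × Int) (x : (String × Int) × Int) : Int × Int :=
  let go := x.1.1; let num := x.1.2; let h := x.2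
  let v := if go = "F" then (PySem.List.pyGet? pvDIRS h).getD (0, 0)
           else PySem.Dict.getD pvVEC go (0, 0)
  (st.1 + num * v.1, st.2 + num * v.2)

def findDestination1_alt (instructions : List (String × Int)) : Int × Int :=
  (instructions.zip (pvHeads instructions 1)).foldl pvStep2 (0, 0)

-- ===== PRECONDITION & SPEC =====
def Spec_findDestination1 (instructions : List (String × Int)) (out : Int × Int) : Prop := out = findDestination1_alt instructions
instance (instructions : List (String × Int)) (out : Int × Int) : Decidable (Spec_findDestination1 instructions out) := by unfold Spec_findDestination1; infer_instance

-- ===== CLAIM (what is proved, stated in full; the proofs are below) =====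
def Claim_equal_findDestination1 : Prop := ∀ (instructions : List (String × Int)), Dom_findDestination1 instructions → Spec_findDestination1 instructions (findDestination1 instructions)

-- ===== LEMMAS AND PROOFS =====

lemma pvVEC_mk : pvVEC = PySem.Dict.mk [("N", (1, 0)), ("E", (0, 1)), ("S", (-1, 0)), ("W", (0, -1))] := by decide

lemma pvVEC_getD_other (g : String) (hN : g ≠ "N") (hE : g ≠ "E") (hS : g ≠ "S") (hW : g ≠ "W") :
    PySem.Dict.getD pvVEC g (0, 0) = ((0 : Int), (0 : Int)) := by
  rw [pvVEC_mk, PySem.Dict.getD_eq_get?_getD]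
  simp [beq_iff_eq, Ne.symm hN, Ne.symm hE, Ne.symm hS, Ne.symm hW,
    PySem.Dict.get?]

-- the facing index produced by one step of A is exactly pvNextHead (f in [0,4) makes cardinal[f] defined)
lemma pvStepA_facing (n e f : Int) (hf0 : 0 ≤ f) (hf4 : f < 4) (g : String) (num : Int) :
    (pvStepA (n, e, f) (g, num)).2.2 = pvNextHead f g num := by
  by_cases hF : g = "F"
  · subst hF
    interval_cases f <;>
      simp [pvStepA, pvNextHead, PySem.List.pyGet?, PySem.List.pyIdx?]
  · simp only [pvStepA, pvNextHead, hF, if_false]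
    split_ifs <;> simp_all

lemma pvNextHead_bounds (f : Int) (g : String) (num : Int) (h0 : 0 ≤ f) (h4 : f < 4) :
    0 ≤ pvNextHead f g num ∧ pvNextHead f g num < 4 := by
  unfold pvNextHead
  have hq : (0:Int) < 4 := by norm_num
  split_ifs <;> exact ⟨by first | exact PySem.Int.mod_nonneg _ hq | exact h0,
                       by first | exact PySem.Int.mod_lt _ hq | exact h4⟩

-- one step: B's table-driven summand matches A's branch-chain update of (north, east)
lemma pv_step (n e f : Int) (hf0 : 0 ≤ f) (hf4 : f < 4) (g : String) (num : Int) :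
    pvStep2 (n, e) ((g, num), f) = ((pvStepA (n, e, f) (g, num)).1, (pvStepA (n, e, f) (g, num)).2.1) := by
  by_cases hF : g = "F"
  · subst hF
    interval_cases f <;>
      simp [pvStep2, pvStepA, pvDIRS, PySem.List.pyGet?, PySem.List.pyIdx?] <;> ring
  · by_cases hN : g = "N"
    · subst hN; simp [pvStep2, pvStepA, show PySem.Dict.getD pvVEC "N" (0, 0) = ((1 : Int), (0 : Int)) from by decide]
    · by_cases hE : g = "E"
      · subst hE; simp [pvStep2, pvStepA, show PySem.Dict.getD pvVEC "E" (0, 0) = ((0 : Int), (1 : Int)) from by decide]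
      · by_cases hS : g = "S"
        · subst hS; simp [pvStep2, pvStepA, show PySem.Dict.getD pvVEC "S" (0, 0) = ((-1 : Int), (0 : Int)) from by decide]; omega
        · by_cases hW : g = "W"
          · subst hW; simp [pvStep2, pvStepA, show PySem.Dict.getD pvVEC "W" (0, 0) = ((0 : Int), (-1 : Int)) from by decide]; omega
          · simp only [pvStep2, pvStepA, hF, hN, hE, hS, hW, if_false,
              pvVEC_getD_other g hN hE hS hW]
            split_ifs <;> simp

-- the two staged passes, fused back together, reproduce A's single-pass fold
lemma pv_loop (ins : List (String × Int)) : ∀ (n e f : Int), 0 ≤ f → f < 4 →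
    (ins.zip (pvHeads ins f)).foldl pvStep2 (n, e)
      = ((ins.foldl pvStepA (n, e, f)).1, (ins.foldl pvStepA (n, e, f)).2.1) := by
  induction ins with
  | nil => intro n e f _ _; rfl
  | cons d tl ih =>
    intro n e f hf0 hf4
    obtain ⟨g, num⟩ := d
    obtain ⟨h0, h4⟩ := pvNextHead_bounds f g num hf0 hf4
    simp only [pvHeads, List.zip_cons_cons, List.foldl_cons, pv_step n e f hf0 hf4 g num]
    have hface := pvStepA_facing n e f hf0 hf4 g num
    rcases hst : pvStepA (n, e, f) (g, num) with ⟨n', e', f'⟩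
    rw [hst] at hface; simp at hface
    subst hface
    exact ih _ _ _ h0 h4

-- ===== VERDICT (by name: the statement is the Claim_ definition above) =====
theorem findDestination1_spec : Claim_equal_findDestination1 := by
  intro ins _
  unfold Spec_findDestination1 findDestination1 findDestination1_alt
  exact (pv_loop ins 0 0 1 (by norm_num) (by norm_num)).symm ▸ rfl
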